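-- pv_equiv track=rewrite | github.com/spyysalo/annalign | annalign.py | find_end_ignorespace
-- ===== SOURCE A (Python) =====
-- def find_end_ignorespace(s, sub, start=0):
--     """Find end of substring sub in s, ignoring extra space in s."""
--     i, j = 0, 0
--     while j < len(sub):
--         if s[start+i] == sub[j]:
--             i += 1
--             j += 1
--         elif s[start+i].isspace():
--             i += 1
--         else:
--             raise ValueError('cannot find substring "{}" in "{}"'.\
--                              format(sub, s[start:]))
--     # TODO skip trailing space too?
--     return start+i
-- ===== SOURCE B (Python) =====
-- def find_end_ignorespace(s, sub, start=0):
--     """Find end of substring sub in s, ignoring extra space in s."""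
--     n = len(s)
--     # staged: one backward pass precomputes next_ns[p] = first index q >= p
--     # with s[q] not whitespace (n if none) ...
--     next_ns = [n] * (n + 1)
--     for p in range(n - 1, -1, -1):
--         next_ns[p] = next_ns[p + 1] if s[p].isspace() else p
--     # ... so the main loop over sub jumps over any whitespace run in one lookup
--     pos = start
--     for c in sub:
--         if not c.isspace():
--             pos = next_ns[pos]
--         else:
--             # a whitespace pattern char matches itself, so only skip other whitespace
--             while s[pos] != c and s[pos].isspace():
--                 pos += 1
--         if s[pos] == c:
--             pos += 1
--         else:
--             raise ValueError('cannot find substring "{}" in "{}"'.\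
--                              format(sub, s[start:]))
--     return pos
-- ===== Notes on version B (the rewrite author's own statement) =====
-- stated objective: alternative
-- what changed: A's flat three-branch while over counters is replaced by a staged algorithm: a backward pass precomputes a next-non-whitespace jump table over s, and the loop over sub then skips any whitespace run with one table lookup (a short scan remains only for whitespace pattern characters, which may match a space).
-- outside the precondition, e.g. on find_end_ignorespace('abc', 'bc', -2): A returns 0, B raises ValueError
import Mathlib
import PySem

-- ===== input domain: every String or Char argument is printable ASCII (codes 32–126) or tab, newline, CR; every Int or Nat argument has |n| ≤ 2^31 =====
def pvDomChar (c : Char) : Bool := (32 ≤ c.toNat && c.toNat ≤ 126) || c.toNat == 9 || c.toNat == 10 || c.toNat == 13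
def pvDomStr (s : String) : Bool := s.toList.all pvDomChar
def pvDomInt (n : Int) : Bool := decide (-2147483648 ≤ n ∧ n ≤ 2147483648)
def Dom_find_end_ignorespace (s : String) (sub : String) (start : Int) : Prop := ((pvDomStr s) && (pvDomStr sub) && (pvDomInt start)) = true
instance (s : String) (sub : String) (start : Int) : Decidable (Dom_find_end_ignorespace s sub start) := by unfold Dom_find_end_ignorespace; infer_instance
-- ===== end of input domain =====

-- B replaces A's flat three-branch while by a staged algorithm: a backward pass precomputes a
-- next-non-whitespace jump table over s, and the loop over sub skips whitespace runs with one
-- table lookup (a short scan remains only for whitespace pattern chars, which may match a space).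
-- Not faster (both linear); equivalence is about the return value, both Pythons raise on the same
-- inputs for start >= 0 (raising inputs are excluded by Pre_).
-- A's loop port uses a fuel argument only as a totality guard: fuel starts at the exact bound
-- (len(s) - start).toNat, so it runs out exactly when the probed index is past the end of s,
-- i.e. exactly where the Python raises IndexError.

-- ===== PORT A =====
-- the while loop of A: state (i, j); error branches (IndexError / ValueError) return 0, excluded by Pre_
def pvGoA (s sub : List Char) (start : Int) : Nat → Int → Int → Int
  | 0, i, j =>
    -- fuel exhausted: start + i is past the end of s, so s[start+i] is an IndexError if the loop
    -- is still running, and the loop's result if it is done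
    if j < (sub.length : Int) then 0 else start + i
  | fuel + 1, i, j =>
    if j < (sub.length : Int) then
      match PySem.List.pyGet? s (start + i) with
      | none => 0  -- Python: IndexError on s[start+i]
      | some c =>
        match PySem.List.pyGet? sub j with
        | none => 0  -- unreachable: 0 ≤ j < len sub along A's execution
        | some d =>
          if c = d then pvGoA s sub start fuel (i + 1) (j + 1)
          else if PySem.Chars.isspace c then pvGoA s sub start fuel (i + 1) j
          else 0  -- Python: raise ValueError
    else start + i

def find_end_ignorespace (s : String) (sub : String) (start : Int) : Int :=
  pvGoA s.toList sub.toList start ((s.toList.length : Int) - start).toNat 0 0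

-- ===== PORT B =====
-- the backward table-filling for loop of B, ported as the obvious right-to-left structural
-- recursion over s with p the index of the first element: entry p is p if s[p] is not
-- whitespace, else entry p+1; the extra final entry is n (= p on the [] step)
def pvNxtAux (xs : List Char) (p : Int) : List Int :=
  match xs with
  | [] => [p]
  | x :: t =>
    let rest := pvNxtAux t (p + 1)
    (if PySem.Chars.isspace x then rest.headI else p) :: rest

-- inner while of B (whitespace pattern char only): first pos' ≥ pos with s[pos'] == c or
-- s[pos'] not space; none = IndexError; fuel = exact remaining length, a totality guard
def pvSkip (s : List Char) (c : Char) : Nat → Int → Option Int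
  | 0, _ => none  -- fuel exhausted: pos is past the end of s, s[pos] is an IndexError
  | fuel + 1, pos =>
    match PySem.List.pyGet? s pos with
    | none => none  -- Python: IndexError on s[pos]
    | some x => if x ≠ c ∧ PySem.Chars.isspace x then pvSkip s c fuel (pos + 1) else some pos

-- the for loop of B over the characters of sub, carrying pos
def pvGoB (s : List Char) (nxt : List Int) (p : List Char) (pos : Int) : Int :=
  match p with
  | [] => pos
  | c :: rest =>
    match (if PySem.Chars.isspace c
           then pvSkip s c ((s.length : Int) - pos).toNat pos
           else PySem.List.pyGet? nxt pos) with  -- next_ns[pos]; none = IndexError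
    | none => 0  -- Python: IndexError
    | some k =>
      match PySem.List.pyGet? s k with
      | none => 0  -- Python: IndexError on s[pos]
      | some x => if x = c then pvGoB s nxt rest (k + 1) else 0  -- else: raise ValueError

def find_end_ignorespace_alt (s : String) (sub : String) (start : Int) : Int :=
  pvGoB s.toList (pvNxtAux s.toList 0) sub.toList start

-- ===== PRECONDITION & SPEC =====
-- pvMatchOk l p: the space-skipping match of p against l succeeds (match-over-skip priority)
def pvMatchOk (l p : List Char) : Bool :=
  match l, p with
  | _, [] => true
  | [], _ :: _ => false
  | x :: l', c :: p' =>
    if x = c then pvMatchOk l' p'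
    else if PySem.Chars.isspace x then pvMatchOk l' (c :: p') else false
termination_by structural l

-- Pre_ excludes (besides the inputs where A raises ValueError/IndexError) negative start with
-- nonempty sub, which is outside the function's natural domain of offsets into s: the values A
-- returns there come from Python's negative-index wraparound, and B's jump table is built for
-- nonnegative positions (B raises ValueError on the cited excluded input).
def Pre_find_end_ignorespace (s : String) (sub : String) (start : Int) : Prop :=
  sub = "" ∨
  (0 ≤ start ∧ pvMatchOk (s.toList.drop start.toNat) sub.toList = true)
instance (s : String) (sub : String) (start : Int) : Decidable (Pre_find_end_ignorespace s sub start) := by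
  unfold Pre_find_end_ignorespace; infer_instance

def pvWitness_find_end_ignorespace : String × String × Int := ("a b", "ab", 0)

def Spec_find_end_ignorespace (s : String) (sub : String) (start : Int) (out : Int) : Prop := out = find_end_ignorespace_alt s sub start
instance (s : String) (sub : String) (start : Int) (out : Int) : Decidable (Spec_find_end_ignorespace s sub start out) := by unfold Spec_find_end_ignorespace; infer_instance

-- ===== CLAIM (what is proved, stated in full; the proofs are below) =====
def Claim_equal_find_end_ignorespace : Prop := ∀ (s : String) (sub : String) (start : Int), Dom_find_end_ignorespace s sub start → Pre_find_end_ignorespace s sub start → Spec_find_end_ignorespace s sub start (find_end_ignorespace s sub start)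

-- ===== LEMMAS AND PROOFS =====

-- length of the leading whitespace run
def pvLsp (l : List Char) : Nat := (l.takeWhile (fun x => PySem.Chars.isspace x)).length

theorem pvNxtAux_length : ∀ (xs : List Char) (p : Int), (pvNxtAux xs p).length = xs.length + 1 := by
  intro xs
  induction xs with
  | nil => intro p; rfl
  | cons x t ih => intro p; simp [pvNxtAux, ih]

-- the table entry at index k is k + (length of the whitespace run of s starting at k), offset by p
theorem pvNxtAux_get : ∀ (xs : List Char) (p : Int) (k : Nat), k ≤ xs.length →
    (pvNxtAux xs p)[k]? = some (p + (k : Int) + ((pvLsp (xs.drop k) : Nat) : Int)) := by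
  intro xs
  induction xs with
  | nil =>
    intro p k hk
    have hk0 : k = 0 := by simpa using hk
    subst hk0
    simp [pvNxtAux, pvLsp]
  | cons x t ih =>
    intro p k hk
    cases k with
    | zero =>
      have h0 := ih (p + 1) 0 (by omega)
      by_cases hsp : PySem.Chars.isspace x = true
      · have hhead : (pvNxtAux t (p + 1)).headI = (p + 1) + ((pvLsp t : Nat) : Int) := by
          cases hr : pvNxtAux t (p + 1) with
          | nil => have := pvNxtAux_length t (p + 1); rw [hr] at this; simp at this
          | cons a l' =>
            rw [hr] at h0; simp at h0
            simpa using h0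
        simp [pvNxtAux, hhead, pvLsp, hsp]
        ring
      · simp [pvNxtAux, pvLsp, hsp]
    | succ k' =>
      have h := ih (p + 1) k' (by simpa using hk)
      rw [List.drop_succ_cons]
      simp only [pvNxtAux, List.getElem?_cons_succ]
      rw [h]
      congr 1
      push_cast
      ring

-- lookup in the built table at a nonnegative in-range position
theorem pvNxt_lookup (s : List Char) (pos : Int) (h0 : 0 ≤ pos) (hle : pos ≤ (s.length : Int)) :
    PySem.List.pyGet? (pvNxtAux s 0) pos
      = some (pos + ((pvLsp (s.drop pos.toNat) : Nat) : Int)) := by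
  have hpos : pos = ((pos.toNat : Nat) : Int) := by omega
  rw [hpos, PySem.List.pyGet?_natCast, pvNxtAux_get s 0 pos.toNat (by omega)]
  simp
  congr 2
  omega

-- lookup past the table is an IndexError
theorem pvNxt_lookup_none (s : List Char) (pos : Int) (hgt : (s.length : Int) + 1 ≤ pos) :
    PySem.List.pyGet? (pvNxtAux s 0) pos = none := by
  rw [PySem.List.pyGet?_eq_none_iff]
  intro hr
  rw [pvNxtAux_length] at hr
  rcases hr with ⟨-, h2⟩
  omega

-- if xs[i] is a value (no IndexError), then i < len xs
theorem pvGet_lt {α : Type} {xs : List α} {i : Int} {x : α}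
    (h : PySem.List.pyGet? xs i = some x) : i < (xs.length : Int) := by
  by_contra hk
  have hnone : PySem.List.pyGet? xs i = none := by
    rw [PySem.List.pyGet?_eq_none_iff]
    intro hr
    exact hk hr.2
  rw [hnone] at h
  simp at h

-- reduction lemmas for the loops
theorem pvSkip_succ_some {s : List Char} {c x : Char} {f : Nat} {pos : Int}
    (hx : PySem.List.pyGet? s pos = some x) :
    pvSkip s c (f + 1) pos =
      if x ≠ c ∧ PySem.Chars.isspace x then pvSkip s c f (pos + 1) else some pos := by
  simp only [pvSkip, hx]

theorem pvGoA_succ_some {s sub : List Char} {start i j : Int} {c d : Char} {f : Nat}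
    (hj : j < (sub.length : Int)) (hx : PySem.List.pyGet? s (start + i) = some c)
    (hd : PySem.List.pyGet? sub j = some d) :
    pvGoA s sub start (f + 1) i j =
      if c = d then pvGoA s sub start f (i + 1) (j + 1)
      else if PySem.Chars.isspace c then pvGoA s sub start f (i + 1) j else 0 := by
  simp only [pvGoA, if_pos hj, hx, hd]

theorem pvGoA_succ_none {s sub : List Char} {start i j : Int} {f : Nat}
    (hj : j < (sub.length : Int)) (hx : PySem.List.pyGet? s (start + i) = none) :
    pvGoA s sub start (f + 1) i j = 0 := by
  simp only [pvGoA, if_pos hj, hx]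

-- from a successful nonnegative lookup, the drop at that position starts with that char
theorem pvDrop_cons {s : List Char} {pos : Int} {x : Char}
    (h0 : 0 ≤ pos) (hx : PySem.List.pyGet? s pos = some x) :
    s.drop pos.toNat = x :: s.drop (pos.toNat + 1) := by
  have hlt := pvGet_lt hx
  have hget : s[pos.toNat]? = some x := by
    rw [← hx]
    exact (PySem.List.pyGet?_of_nonneg _ h0).symm
  have hlt' : pos.toNat < s.length := by omega
  rw [List.drop_eq_getElem_cons hlt']
  congr 1
  rw [List.getElem?_eq_getElem hlt'] at hget
  exact Option.some_injective _ hget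

-- the two loops agree for nonnegative positions: A at (i, j = |pre|) with sub = pre ++ rest
-- equals B at rest, pos = start + i
theorem pvKey : ∀ (fuel : Nat) (s pre rest : List Char) (start i : Int),
    0 ≤ start + i →
    (((s.length : Int) - (start + i)).toNat ≤ fuel) →
    pvGoA s (pre ++ rest) start fuel i (pre.length : Int)
      = pvGoB s (pvNxtAux s 0) rest (start + i) := by
  intro fuel
  induction fuel with
  | zero =>
    intro s pre rest start i h0 hn
    have hz : ((s.length : Int) - (start + i)).toNat = 0 := by omega
    have hge : (s.length : Int) ≤ start + i := by omega
    cases rest with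
    | nil => simp [pvGoA, pvGoB]
    | cons c rest' =>
      have hj : ((pre.length : Int)) < (((pre ++ c :: rest').length : Nat) : Int) := by simp
      by_cases hsp : PySem.Chars.isspace c = true
      · simp only [pvGoA, pvGoB, hz, pvSkip, if_pos hj, if_pos hsp]
      · simp only [pvGoA, pvGoB, hz, if_pos hj, if_neg hsp]
        by_cases heq : start + i = (s.length : Int)
        · have hlk := pvNxt_lookup s (start + i) h0 (by omega)
          have hdrop : s.drop (start + i).toNat = [] := by
            apply List.drop_eq_nil_of_le; omega
          rw [hlk, hdrop]
          have hnone : PySem.List.pyGet? s (start + i + ((pvLsp ([] : List Char) : Nat) : Int)) = none := by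
            rw [PySem.List.pyGet?_eq_none_iff]
            intro hr
            have : start + i + ((pvLsp ([] : List Char) : Nat) : Int) < (s.length : Int) := hr.2
            simp [pvLsp] at this
            omega
          simp only [hnone]
        · rw [pvNxt_lookup_none s (start + i) (by omega)]
  | succ fuel ih =>
    intro s pre rest start i h0 hn
    cases rest with
    | nil => simp [pvGoA, pvGoB]
    | cons c rest' =>
      have hj : ((pre.length : Int)) < (((pre ++ c :: rest').length : Nat) : Int) := by simp
      have hsub : PySem.List.pyGet? (pre ++ c :: rest') (pre.length : Int) = some c :=
        PySem.List.pyGet?_append_length pre rest' c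
      cases hx : PySem.List.pyGet? s (start + i) with
      | none =>
        -- IndexError in A; in B the step hits the same IndexError
        have hge : (s.length : Int) ≤ start + i := by
          by_contra hk
          have : PySem.List.pyGet? s (start + i) ≠ none := by
            intro hnone
            rw [PySem.List.pyGet?_eq_none_iff] at hnone
            exact hnone ⟨by omega, by omega⟩
          exact this hx
        rw [pvGoA_succ_none hj hx]
        by_cases hsp : PySem.Chars.isspace c = true
        · have hz : ((s.length : Int) - (start + i)).toNat = 0 := by omega
          simp only [pvGoB, if_pos hsp, hz, pvSkip]
        · simp only [pvGoB, if_neg hsp]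
          by_cases heq : start + i = (s.length : Int)
          · have hlk := pvNxt_lookup s (start + i) h0 (by omega)
            have hdrop : s.drop (start + i).toNat = [] := by
              apply List.drop_eq_nil_of_le; omega
            rw [hlk, hdrop]
            have hnone : PySem.List.pyGet? s (start + i + ((pvLsp ([] : List Char) : Nat) : Int)) = none := by
              rw [PySem.List.pyGet?_eq_none_iff]
              intro hr
              have : start + i + ((pvLsp ([] : List Char) : Nat) : Int) < (s.length : Int) := hr.2
              simp [pvLsp] at this
              omega
            simp only [hnone]
          · rw [pvNxt_lookup_none s (start + i) (by omega)]
      | some x =>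
        have hlt := pvGet_lt hx
        have hfs : ((s.length : Int) - (start + i)).toNat
            = (((s.length : Int) - (start + (i + 1))).toNat) + 1 := by omega
        have hadd : start + i + 1 = start + (i + 1) := by ring
        have hdropc := pvDrop_cons h0 hx
        by_cases hsp : PySem.Chars.isspace c = true
        · -- whitespace pattern char: B uses the inner skip loop, aligned step by step with A
          by_cases hxc : x = c
          · subst hxc
            have hns : ¬ (x ≠ x ∧ PySem.Chars.isspace x) := by simp
            have hskip : pvSkip s x (((s.length : Int) - (start + i)).toNat) (start + i)
                = some (start + i) := by
              rw [hfs, pvSkip_succ_some hx, if_neg hns]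
            have hR : pvGoB s (pvNxtAux s 0) (x :: rest') (start + i)
                = pvGoB s (pvNxtAux s 0) rest' (start + (i + 1)) := by
              simp [pvGoB, hsp, hskip, hx, hadd]
            have ihx := ih s (pre ++ [x]) rest' start (i + 1) (by omega) (by omega)
            have harr : pre ++ x :: rest' = (pre ++ [x]) ++ rest' := by
              rw [List.append_assoc]; rfl
            have hlen : (pre.length : Int) + 1 = (((pre ++ [x]).length : Nat) : Int) := by simp
            rw [pvGoA_succ_some hj hx hsub, if_pos rfl, harr, hlen, ihx, hR]
          · by_cases hspx : PySem.Chars.isspace x = true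
            · -- A skips one space; B's inner while skips it too
              have hskip : pvSkip s c (((s.length : Int) - (start + i)).toNat) (start + i)
                  = pvSkip s c (((s.length : Int) - (start + (i + 1))).toNat) (start + (i + 1)) := by
                rw [hfs, pvSkip_succ_some hx, if_pos (And.intro hxc hspx), hadd]
              have hB : pvGoB s (pvNxtAux s 0) (c :: rest') (start + i)
                  = pvGoB s (pvNxtAux s 0) (c :: rest') (start + (i + 1)) := by
                simp only [pvGoB, if_pos hsp, hskip]
              have ihx := ih s pre (c :: rest') start (i + 1) (by omega) (by omega)
              rw [pvGoA_succ_some hj hx hsub, if_neg hxc, if_pos hspx, ihx, hB]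
            · -- mismatch on a non-space: both raise ValueError (return 0)
              have hns : ¬ (x ≠ c ∧ PySem.Chars.isspace x) := fun hand => hspx hand.2
              have hskip : pvSkip s c (((s.length : Int) - (start + i)).toNat) (start + i)
                  = some (start + i) := by
                rw [hfs, pvSkip_succ_some hx, if_neg hns]
              rw [pvGoA_succ_some hj hx hsub, if_neg hxc, if_neg hspx]
              simp [pvGoB, hsp, hskip, hx, hxc]
        · -- non-space pattern char: B jumps via the table
          have hlk := pvNxt_lookup s (start + i) h0 (by omega)
          by_cases hxc : x = c
          · -- s[pos] = c is not whitespace, so the jump stays in place; both match and advance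
            subst hxc
            have hspx : PySem.Chars.isspace x = false := by
              cases h : PySem.Chars.isspace x
              · rfl
              · exact absurd h hsp
            have hl0 : pvLsp (s.drop (start + i).toNat) = 0 := by
              rw [hdropc]; simp [pvLsp, hspx]
            have hB : pvGoB s (pvNxtAux s 0) (x :: rest') (start + i)
                = pvGoB s (pvNxtAux s 0) rest' (start + (i + 1)) := by
              simp only [pvGoB, if_neg hsp, hlk, hl0]
              simp only [Nat.cast_zero, add_zero]
              simp [hx, hadd]
            have ihx := ih s (pre ++ [x]) rest' start (i + 1) (by omega) (by omega)
            have harr : pre ++ x :: rest' = (pre ++ [x]) ++ rest' := by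
              rw [List.append_assoc]; rfl
            have hlen : (pre.length : Int) + 1 = (((pre ++ [x]).length : Nat) : Int) := by simp
            rw [pvGoA_succ_some hj hx hsub, if_pos rfl, harr, hlen, ihx, hB]
          · by_cases hspx : PySem.Chars.isspace x = true
            · -- A skips one space; B's table value is unchanged by that skip
              have hl1 : pvLsp (s.drop (start + i).toNat)
                  = pvLsp (s.drop (start + (i + 1)).toNat) + 1 := by
                rw [hdropc]
                have : (start + i).toNat + 1 = (start + (i + 1)).toNat := by omega
                rw [this]
                simp [pvLsp, hspx]
              have hlk' := pvNxt_lookup s (start + (i + 1)) (by omega) (by omega)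
              have hB : pvGoB s (pvNxtAux s 0) (c :: rest') (start + i)
                  = pvGoB s (pvNxtAux s 0) (c :: rest') (start + (i + 1)) := by
                simp only [pvGoB, if_neg hsp, hlk, hlk', hl1]
                have : start + i + ((pvLsp (s.drop (start + (i + 1)).toNat) + 1 : Nat) : Int)
                    = start + (i + 1) + ((pvLsp (s.drop (start + (i + 1)).toNat) : Nat) : Int) := by
                  push_cast; ring
                rw [this]
              have ihx := ih s pre (c :: rest') start (i + 1) (by omega) (by omega)
              rw [pvGoA_succ_some hj hx hsub, if_neg hxc, if_pos hspx, ihx, hB]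
            · -- mismatch on a non-space: the jump stays in place, both raise ValueError (return 0)
              have hl0 : pvLsp (s.drop (start + i).toNat) = 0 := by
                rw [hdropc]; simp [pvLsp, hspx]
              rw [pvGoA_succ_some hj hx hsub, if_neg hxc, if_neg hspx]
              simp only [pvGoB, if_neg hsp, hlk, hl0]
              simp only [Nat.cast_zero, add_zero]
              simp [hx, hxc]

-- the empty pattern: both loops exit immediately with start, for every start
theorem pvEmpty (s : String) (start : Int) :
    find_end_ignorespace s "" start = find_end_ignorespace_alt s "" start := by
  unfold find_end_ignorespace find_end_ignorespace_alt
  have h : ("" : String).toList = [] := rfl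
  rw [h]
  cases hf : ((s.toList.length : Int) - start).toNat with
  | zero => simp [pvGoA, pvGoB]
  | succ f => simp [pvGoA, pvGoB]

theorem pvMain (s sub : String) (start : Int) (h0 : 0 ≤ start) :
    find_end_ignorespace s sub start = find_end_ignorespace_alt s sub start := by
  have h := pvKey ((s.toList.length : Int) - start).toNat s.toList [] sub.toList start 0
    (by omega) (by omega)
  simpa [find_end_ignorespace, find_end_ignorespace_alt] using h

-- ===== VERDICT (by name: the statement is the Claim_ definition above) =====
theorem find_end_ignorespace_spec : Claim_equal_find_end_ignorespace := by
  intro s sub start _ hpre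
  unfold Spec_find_end_ignorespace
  rcases hpre with hsub | ⟨h0, -⟩
  · subst hsub; exact pvEmpty s start
  · exact pvMain s sub start h0
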